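-- pv_equiv track=rewrite | github.com/darkli/research | 01.merge_rules.py | looks_like_dlc_text
-- ===== SOURCE A (Python) =====
-- def strip_dlc_comment(line):
--     for index, char in enumerate(line):
--         if char == "#" and (index == 0 or line[index - 1].isspace()):
--             return line[:index].strip()
--     return line.strip()
--
-- def looks_like_dlc_text(text):
--     meaningful_lines = 0
--     for raw_line in text.splitlines():
--         line = strip_dlc_comment(raw_line)
--         if not line:
--             continue
--         meaningful_lines += 1
--         token = line.split()[0]
--         if (
--             token.startswith("include:")
--             or token.startswith(("domain:", "full:", "keyword:", "regexp:"))
--             or "." in token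
--         ):
--             continue
--         return False
--     return meaningful_lines > 0
-- ===== SOURCE B (Python) =====
-- def looks_like_dlc_text(text):
--     meaningful = 0
--     for raw_line in text.splitlines():
--         tokens = raw_line.split()
--         if not tokens or tokens[0].startswith("#"):
--             continue
--         meaningful += 1
--         token = tokens[0]
--         if token.startswith(("include:", "domain:", "full:", "keyword:", "regexp:")) or "." in token:
--             continue
--         return False
--     return meaningful > 0
-- ===== Notes on version B (the rewrite author's own statement) =====
-- stated objective: simpler
-- what changed: Drops the char-by-char strip_dlc_comment scan (index bookkeeping, prev-char isspace test, slicing and re-stripping) and instead tokenizes each line once with split(): a comment starts exactly at a token whose first char is the comment marker, so the line is meaningful iff its first token exists and is not such a marker token.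
import Mathlib
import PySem

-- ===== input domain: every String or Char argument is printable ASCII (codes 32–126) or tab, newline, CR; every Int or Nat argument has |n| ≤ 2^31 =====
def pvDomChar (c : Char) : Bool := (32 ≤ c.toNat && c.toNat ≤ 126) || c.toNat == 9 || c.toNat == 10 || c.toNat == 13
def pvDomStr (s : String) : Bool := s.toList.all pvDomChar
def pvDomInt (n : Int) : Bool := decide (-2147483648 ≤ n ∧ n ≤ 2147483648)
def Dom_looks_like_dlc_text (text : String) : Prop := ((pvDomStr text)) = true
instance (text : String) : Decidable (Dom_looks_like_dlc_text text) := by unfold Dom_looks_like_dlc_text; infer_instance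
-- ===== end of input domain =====

-- B replaces A's char-by-char comment scan (strip_dlc_comment) by a single split() per line:
-- a comment starts exactly at a token whose first char is '#'. Same return value; objective: simpler.

-- ===== PORT A =====
-- strip_dlc_comment's loop: for index, char in enumerate(line): if char == "#" and (index == 0 or line[index-1].isspace()): return line[:index].strip()
def pvSdcLoop (line : List Char) : List (Int × Char) → List Char
  | [] => PySem.Chars.strip line
  | (i, ch) :: rest =>
    if ch = '#' ∧ (i = 0 ∨ ((PySem.List.pyGet? line (i - 1)).any PySem.Chars.isspace)) then
      PySem.Chars.strip (PySem.List.slice line none (some i))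
    else pvSdcLoop line rest

def pvStripDlcComment (line : List Char) : List Char :=
  pvSdcLoop line (PySem.List.enumerate line 0)

-- A's main loop, with the running meaningful_lines count
def pvLoopA : List (List Char) → Nat → Bool
  | [], m => decide (m > 0)
  | raw :: rest, m =>
    let line := pvStripDlcComment raw
    if line = [] then pvLoopA rest m
    else
      -- line.split()[0]: line is nonempty and stripped, so split() is nonempty (proved below); headD is exact here
      let token := (PySem.Chars.split₀ line).headD []
      if PySem.Chars.startswith token "include:".toList
          || (PySem.Chars.startswith token "domain:".toList
              || PySem.Chars.startswith token "full:".toList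
              || PySem.Chars.startswith token "keyword:".toList
              || PySem.Chars.startswith token "regexp:".toList)
          || PySem.Chars.isIn ['.'] token then
        pvLoopA rest (m + 1)
      else false

def looks_like_dlc_text (text : String) : Bool :=
  pvLoopA (PySem.Chars.splitlines text.toList) 0

-- ===== PORT B =====
def pvTokenOk (t : List Char) : Bool :=
  PySem.Chars.startswith t "include:".toList
    || PySem.Chars.startswith t "domain:".toList
    || PySem.Chars.startswith t "full:".toList
    || PySem.Chars.startswith t "keyword:".toList
    || PySem.Chars.startswith t "regexp:".toList
    || PySem.Chars.isIn ['.'] t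

def pvLoopB : List (List Char) → Nat → Bool
  | [], m => decide (m > 0)
  | raw :: rest, m =>
    match PySem.Chars.split₀ raw with
    | [] => pvLoopB rest m
    | t :: _ =>
      if PySem.Chars.startswith t ['#'] then pvLoopB rest m
      else if pvTokenOk t then pvLoopB rest (m + 1)
      else false

def looks_like_dlc_text_alt (text : String) : Bool :=
  pvLoopB (PySem.Chars.splitlines text.toList) 0

-- ===== PRECONDITION & SPEC =====
def Spec_looks_like_dlc_text (text : String) (out : Bool) : Prop := out = looks_like_dlc_text_alt text
instance (text : String) (out : Bool) : Decidable (Spec_looks_like_dlc_text text out) := by unfold Spec_looks_like_dlc_text; infer_instance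

-- ===== CLAIM (what is proved, stated in full; the proofs are below) =====
def Claim_equal_looks_like_dlc_text : Prop := ∀ (text : String), Dom_looks_like_dlc_text text → Spec_looks_like_dlc_text text (looks_like_dlc_text text)

-- ===== LEMMAS AND PROOFS =====

-- keep-token predicate: tokens before the comment do not start with '#'
def pvKeep (t : List Char) : Bool := !(PySem.Chars.startswith t ['#'])

-- "previous char is whitespace or we are at the start"; seen = consumed prefix, reversed
def pvPrevOk : List Char → Bool
  | [] => true
  | s0 :: _ => PySem.Chars.isspace s0

-- pure reformulation of the strip_dlc_comment scan
def pvSdc2 : List Char → List Char → List Char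
  | seen, [] => PySem.Chars.strip seen.reverse
  | seen, c :: rest =>
    if c = '#' ∧ pvPrevOk seen = true then PySem.Chars.strip seen.reverse
    else pvSdc2 (c :: seen) rest

theorem pvGoAcc (rest : List Char) : ∀ (cur : List Char) (acc : List (List Char)),
    PySem.Chars.split₀.go rest cur acc = acc.reverse ++ PySem.Chars.split₀.go rest cur [] := by
  induction rest with
  | nil =>
    intro cur acc
    simp only [PySem.Chars.split₀.go]
    by_cases h : cur.isEmpty <;> simp [h]
  | cons c r ih =>
    intro cur acc
    simp only [PySem.Chars.split₀.go]
    by_cases hs : PySem.Chars.isspace c <;> by_cases hc : cur.isEmpty <;> simp only [hs, hc, if_true, if_false, Bool.false_eq_true, ite_false, ite_true]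
    · exact ih [] acc
    · rw [ih [] (cur.reverse :: acc), ih [] [cur.reverse]]; simp
    · exact ih (c :: cur) acc
    · exact ih (c :: cur) acc

theorem pvGoShape (rest : List Char) : ∀ cur, cur ≠ [] →
    ∃ ext tail, PySem.Chars.split₀.go rest cur [] = (cur.reverse ++ ext) :: tail := by
  induction rest with
  | nil =>
    intro cur h
    refine ⟨[], [], ?_⟩
    simp [PySem.Chars.split₀.go, h]
  | cons c r ih =>
    intro cur h
    simp only [PySem.Chars.split₀.go]
    by_cases hs : PySem.Chars.isspace c
    · refine ⟨[], PySem.Chars.split₀.go r [] [], ?_⟩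
      rw [pvGoAcc r [] [cur.reverse]]
      simp [hs, List.isEmpty_eq_false_iff.mpr h]
    · simp only [hs, Bool.false_eq_true, ite_false]
      obtain ⟨ext, tail, he⟩ := ih (c :: cur) (by simp)
      exact ⟨c :: ext, tail, by simpa using he⟩

theorem pvGoAllSpace (ws : List Char) (h : ∀ c ∈ ws, PySem.Chars.isspace c = true) : ∀ (cur : List Char) (acc : List (List Char)),
    PySem.Chars.split₀.go ws cur acc = PySem.Chars.split₀.go [] cur acc := by
  induction ws with
  | nil => intro cur acc; rfl
  | cons c r ih =>
    intro cur acc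
    have hc : PySem.Chars.isspace c = true := h c (by simp)
    have hr : ∀ c ∈ r, PySem.Chars.isspace c = true := fun c hm => h c (by simp [hm])
    simp only [PySem.Chars.split₀.go, hc, if_true]
    by_cases he : cur.isEmpty <;> simp only [he, if_true, if_false, Bool.false_eq_true]
    · rw [ih hr [] acc]
      simp [PySem.Chars.split₀.go, List.isEmpty_iff.mp he]
    · rw [ih hr [] (cur.reverse :: acc)]
      simp [PySem.Chars.split₀.go, he]

theorem pvGoDropLeadSpace (ws : List Char) (h : ∀ c ∈ ws, PySem.Chars.isspace c = true) (z : List Char) :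
    PySem.Chars.split₀.go (ws ++ z) [] [] = PySem.Chars.split₀.go z [] [] := by
  induction ws with
  | nil => rfl
  | cons c r ih =>
    have hc : PySem.Chars.isspace c = true := h c (by simp)
    simp only [List.cons_append, PySem.Chars.split₀.go, hc, if_true, List.isEmpty_nil]
    exact ih (fun c hm => h c (by simp [hm]))

theorem pvGoDropTrailSpace (x : List Char) (ws : List Char) (h : ∀ c ∈ ws, PySem.Chars.isspace c = true) : ∀ (cur : List Char) (acc : List (List Char)),
    PySem.Chars.split₀.go (x ++ ws) cur acc = PySem.Chars.split₀.go x cur acc := by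
  induction x with
  | nil => intro cur acc; simpa using pvGoAllSpace ws h cur acc
  | cons c r ih =>
    intro cur acc
    simp only [List.cons_append, PySem.Chars.split₀.go]
    by_cases hs : PySem.Chars.isspace c <;> by_cases he : cur.isEmpty <;>
      simp only [hs, he, if_true, if_false, Bool.false_eq_true] <;> apply ih

theorem pvSplit_lstrip (x : List Char) : PySem.Chars.split₀ (PySem.Chars.lstrip x) = PySem.Chars.split₀ x := by
  unfold PySem.Chars.split₀ PySem.Chars.lstrip
  conv_rhs => rw [← List.takeWhile_append_dropWhile (p := PySem.Chars.isspace) (l := x)]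
  rw [pvGoDropLeadSpace _ (fun c hm => List.mem_takeWhile_imp hm)]

theorem pvSplit_rstrip (x : List Char) : PySem.Chars.split₀ (PySem.Chars.rstrip x) = PySem.Chars.split₀ x := by
  unfold PySem.Chars.split₀ PySem.Chars.rstrip
  conv_rhs => rw [show x = (List.dropWhile PySem.Chars.isspace x.reverse).reverse ++ (List.takeWhile PySem.Chars.isspace x.reverse).reverse by
    rw [← List.reverse_append, List.takeWhile_append_dropWhile, List.reverse_reverse]]
  rw [pvGoDropTrailSpace _ _ (fun c hm => List.mem_takeWhile_imp (List.mem_reverse.mp hm))]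

theorem pvSplit_strip (x : List Char) : PySem.Chars.split₀ (PySem.Chars.strip x) = PySem.Chars.split₀ x := by
  unfold PySem.Chars.strip
  rw [pvSplit_rstrip, pvSplit_lstrip]

theorem pvSplit_strip_ne (y : List Char) (h : PySem.Chars.strip y ≠ []) :
    PySem.Chars.split₀ (PySem.Chars.strip y) ≠ [] := by
  -- the head of strip y is a non-space char
  set z := PySem.Chars.lstrip y with hz
  have hpre : PySem.Chars.strip y <+: z := by
    rw [PySem.Chars.strip, ← hz]
    unfold PySem.Chars.rstrip
    have := (List.dropWhile_suffix (l := z.reverse) PySem.Chars.isspace).reverse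
    simpa using this
  obtain ⟨c, t, hct⟩ : ∃ c t, PySem.Chars.strip y = c :: t := by
    cases hs : PySem.Chars.strip y with
    | nil => exact absurd hs h
    | cons c t => exact ⟨c, t, rfl⟩
  have hzhead : ∃ t', z = c :: t' := by
    obtain ⟨u, hu⟩ := hpre
    rw [hct] at hu
    exact ⟨t ++ u, by simp [← hu]⟩
  obtain ⟨t', ht'⟩ := hzhead
  have hznil : z ≠ [] := by simp [ht']
  have hdz : List.dropWhile PySem.Chars.isspace y = z := by rw [hz]; rfl
  have hd : List.dropWhile PySem.Chars.isspace y ≠ [] := by rw [hdz]; exact hznil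
  have hcns : PySem.Chars.isspace c = false := by
    have h2 := List.head_dropWhile_not PySem.Chars.isspace hd
    have h3 : List.dropWhile PySem.Chars.isspace y = c :: t' := by rw [hdz]; exact ht'
    simpa [h3] using h2
  rw [hct]
  unfold PySem.Chars.split₀
  simp only [PySem.Chars.split₀.go, hcns, Bool.false_eq_true, if_false, List.isEmpty_nil]
  obtain ⟨ext, tail, he⟩ := pvGoShape t [c] (by simp)
  simp [he]

theorem pvSdc2_is_strip (rest : List Char) : ∀ seen, ∃ y, pvSdc2 seen rest = PySem.Chars.strip y := by
  induction rest with
  | nil => intro seen; exact ⟨seen.reverse, rfl⟩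
  | cons c r ih =>
    intro seen
    by_cases hc : c = '#' ∧ pvPrevOk seen = true
    · exact ⟨seen.reverse, by simp [pvSdc2, hc]⟩
    · simpa [pvSdc2, hc] using ih (c :: seen)

theorem pvSdcLoop_eq_sdc2 (rest : List Char) : ∀ (seen : List Char),
    pvSdcLoop (seen.reverse ++ rest) (PySem.List.enumerate rest (seen.length : Int)) = pvSdc2 seen rest := by
  induction rest with
  | nil => intro seen; simp [PySem.List.enumerate_nil, pvSdcLoop, pvSdc2]
  | cons c r ih =>
    intro seen
    rw [PySem.List.enumerate_cons]
    show (if c = '#' ∧ ((seen.length : Int) = 0 ∨ ((PySem.List.pyGet? (seen.reverse ++ c :: r) ((seen.length : Int) - 1)).any PySem.Chars.isspace)) then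
        PySem.Chars.strip (PySem.List.slice (seen.reverse ++ c :: r) none (some (seen.length : Int)))
      else pvSdcLoop (seen.reverse ++ c :: r) (PySem.List.enumerate r ((seen.length : Int) + 1))) = pvSdc2 seen (c :: r)
    have hcond : (c = '#' ∧ ((seen.length : Int) = 0 ∨ ((PySem.List.pyGet? (seen.reverse ++ c :: r) ((seen.length : Int) - 1)).any PySem.Chars.isspace)))
        ↔ (c = '#' ∧ pvPrevOk seen = true) := by
      cases seen with
      | nil => simp [pvPrevOk]
      | cons s0 s' =>
        have hlen : ((s0 :: s').length : Int) - 1 = ((s'.length : Nat) : Int) := by simp only [List.length_cons]; push_cast; omega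
        have hget : PySem.List.pyGet? ((s0 :: s').reverse ++ c :: r) ((s'.length : Nat) : Int) = some s0 := by
          rw [PySem.List.pyGet?_natCast]
          rw [List.getElem?_append_left (by simp)]
          rw [List.getElem?_reverse (by simp)]
          simp
        rw [hlen, hget]
        simp only [pvPrevOk, Option.any_some]
        constructor
        · rintro ⟨h1, h2⟩
          refine ⟨h1, ?_⟩
          rcases h2 with h2 | h2
          · exfalso; simp only [List.length_cons] at h2; omega
          · exact h2
        · rintro ⟨h1, h2⟩; exact ⟨h1, Or.inr h2⟩
    rw [if_congr hcond rfl rfl]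
    by_cases h : c = '#' ∧ pvPrevOk seen = true
    · rw [if_pos h]
      have : PySem.List.slice (seen.reverse ++ c :: r) none (some (seen.length : Int)) = seen.reverse := by
        rw [PySem.List.slice_to _ (by positivity)]
        simp [List.take_left']
      rw [this]
      simp [pvSdc2, h]
    · rw [if_neg h]
      have h2 : seen.reverse ++ c :: r = (c :: seen).reverse ++ r := by simp
      have h3 : ((seen.length : Int) + 1) = (((c :: seen).length : Nat) : Int) := by simp only [List.length_cons]; push_cast; omega
      rw [h2, h3, ih (c :: seen)]
      simp [pvSdc2, h]

theorem pvKeep_iff (t : List Char) : pvKeep t = true ↔ t.head? ≠ some '#' := by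
  cases t with
  | nil => simp [pvKeep, PySem.Chars.startswith, List.isPrefixOf]
  | cons x xs =>
    simp [pvKeep, PySem.Chars.startswith, List.isPrefixOf]
    constructor
    · intro h hx; exact h hx.symm
    · intro h hx; exact h hx.symm

theorem pvJoint (rest : List Char) : ∀ (seen cur : List Char) (acc : List (List Char)),
    (cur = [] ↔ pvPrevOk seen = true) →
    (∀ hc : cur ≠ [], cur.getLast hc ≠ '#') →
    (∀ t ∈ acc, pvKeep t = true) →
    (∀ contin, PySem.Chars.split₀.go (seen.reverse ++ contin) [] [] = PySem.Chars.split₀.go contin cur acc) →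
    PySem.Chars.split₀ (pvSdc2 seen rest) = (PySem.Chars.split₀.go rest cur acc).takeWhile pvKeep := by
  induction rest with
  | nil =>
    intro seen cur acc h1 h2 h3 h4
    have hL : PySem.Chars.split₀ (pvSdc2 seen []) = PySem.Chars.split₀.go [] cur acc := by
      show PySem.Chars.split₀ (PySem.Chars.strip seen.reverse) = _
      rw [pvSplit_strip]
      simpa [PySem.Chars.split₀] using h4 []
    rw [hL]
    symm
    apply List.takeWhile_eq_self_iff.mpr
    intro t ht
    simp only [PySem.Chars.split₀.go] at ht
    by_cases hc0 : cur = []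
    · simp [hc0] at ht
      exact h3 t ht
    · simp [List.isEmpty_eq_false_iff.mpr hc0] at ht
      rcases ht with ht | ht
      · exact h3 t ht
      · subst ht
        rw [pvKeep_iff, List.head?_reverse, List.getLast?_eq_getLast hc0]
        intro h
        exact h2 hc0 (Option.some_injective _ h)
  | cons c r ih =>
    intro seen cur acc h1 h2 h3 h4
    by_cases hhit : c = '#' ∧ pvPrevOk seen = true
    · have hcur : cur = [] := h1.mpr hhit.2
      subst hcur
      have hL : PySem.Chars.split₀ (pvSdc2 seen (c :: r)) = PySem.Chars.split₀.go [] [] acc := by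
        simp only [pvSdc2, if_pos hhit]
        rw [pvSplit_strip]
        simpa [PySem.Chars.split₀] using h4 []
      rw [hL]
      obtain ⟨hc', hpo⟩ := hhit
      subst hc'
      have hsp : PySem.Chars.isspace '#' = false := by decide
      have hR : PySem.Chars.split₀.go ('#' :: r) [] acc = PySem.Chars.split₀.go r ['#'] acc := by
        simp [PySem.Chars.split₀.go, hsp]
      rw [hR, pvGoAcc r ['#'] acc]
      obtain ⟨ext, tail, he⟩ := pvGoShape r ['#'] (by simp)
      rw [he]
      rw [List.takeWhile_append_of_pos (fun t ht => h3 t (List.mem_reverse.mp ht))]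
      have hkf : pvKeep (['#'].reverse ++ ext) = false := by
        simp [pvKeep, PySem.Chars.startswith, List.isPrefixOf]
      rw [List.takeWhile_cons]
      simp only [hkf, Bool.false_eq_true, if_false]
      simp [PySem.Chars.split₀.go]
    · have hL : pvSdc2 seen (c :: r) = pvSdc2 (c :: seen) r := by
        simp only [pvSdc2, if_neg hhit]
      rw [hL]
      by_cases hs : PySem.Chars.isspace c = true
      · by_cases hc0 : cur = []
        · subst hc0
          have hR : PySem.Chars.split₀.go (c :: r) [] acc = PySem.Chars.split₀.go r [] acc := by
            simp [PySem.Chars.split₀.go, hs]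
          rw [hR]
          apply ih (c :: seen) [] acc (by simp [pvPrevOk, hs]) (fun hc => absurd rfl hc) h3
          intro contin
          have e1 : (c :: seen).reverse ++ contin = seen.reverse ++ (c :: contin) := by simp
          rw [e1, h4 (c :: contin)]
          simp [PySem.Chars.split₀.go, hs]
        · have hR : PySem.Chars.split₀.go (c :: r) cur acc = PySem.Chars.split₀.go r [] (cur.reverse :: acc) := by
            simp [PySem.Chars.split₀.go, hs, List.isEmpty_eq_false_iff.mpr hc0]
          rw [hR]
          apply ih (c :: seen) [] (cur.reverse :: acc) (by simp [pvPrevOk, hs]) (fun hc => absurd rfl hc)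
          · intro t ht
            rcases List.mem_cons.mp ht with ht | ht
            · subst ht
              rw [pvKeep_iff, List.head?_reverse, List.getLast?_eq_getLast hc0]
              intro h
              exact h2 hc0 (Option.some_injective _ h)
            · exact h3 t ht
          · intro contin
            have e1 : (c :: seen).reverse ++ contin = seen.reverse ++ (c :: contin) := by simp
            rw [e1, h4 (c :: contin)]
            simp [PySem.Chars.split₀.go, hs, List.isEmpty_eq_false_iff.mpr hc0]
      · by_cases hc0 : cur = []
        · subst hc0
          have hcne : c ≠ '#' := fun hc => hhit ⟨hc, h1.mp rfl⟩
          have hR : PySem.Chars.split₀.go (c :: r) [] acc = PySem.Chars.split₀.go r [c] acc := by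
            simp [PySem.Chars.split₀.go, hs]
          rw [hR]
          apply ih (c :: seen) [c] acc (by simp [pvPrevOk, hs]) (fun _ => by simpa using hcne) h3
          intro contin
          have e1 : (c :: seen).reverse ++ contin = seen.reverse ++ (c :: contin) := by simp
          rw [e1, h4 (c :: contin)]
          simp [PySem.Chars.split₀.go, hs]
        · have hR : PySem.Chars.split₀.go (c :: r) cur acc = PySem.Chars.split₀.go r (c :: cur) acc := by
            simp [PySem.Chars.split₀.go, hs]
          rw [hR]
          apply ih (c :: seen) (c :: cur) acc (by simp [pvPrevOk, hs]) ?_ h3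
          · intro contin
            have e1 : (c :: seen).reverse ++ contin = seen.reverse ++ (c :: contin) := by simp
            rw [e1, h4 (c :: contin)]
            simp [PySem.Chars.split₀.go, hs]
          · intro hc
            rw [List.getLast_cons hc0]
            exact h2 hc0

-- tokenizing the comment-stripped line = keeping the tokens before the first '#'-token
theorem pvCore (l : List Char) :
    PySem.Chars.split₀ (pvStripDlcComment l) = (PySem.Chars.split₀ l).takeWhile pvKeep := by
  have hb : pvStripDlcComment l = pvSdc2 [] l := by
    simpa using pvSdcLoop_eq_sdc2 l []
  rw [hb]
  exact pvJoint l [] [] [] (by simp [pvPrevOk]) (fun hc => absurd rfl hc) (by simp)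
    (fun contin => by simp)

theorem pvStrip_of_sdc (l : List Char) : ∃ y, pvStripDlcComment l = PySem.Chars.strip y := by
  have hb : pvStripDlcComment l = pvSdc2 [] l := by
    simpa using pvSdcLoop_eq_sdc2 l []
  rw [hb]
  exact pvSdc2_is_strip l []

theorem pvLoops_eq (lines : List (List Char)) : ∀ m, pvLoopA lines m = pvLoopB lines m := by
  induction lines with
  | nil => intro m; rfl
  | cons raw rest ih =>
    intro m
    have hcore := pvCore raw
    by_cases hline : pvStripDlcComment raw = []
    · have hA : pvLoopA (raw :: rest) m = pvLoopA rest m := by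
        simp only [pvLoopA, hline, if_pos]
      have hsplit : (PySem.Chars.split₀ raw).takeWhile pvKeep = [] := by
        rw [← hcore, hline]
        rfl
      cases hs : PySem.Chars.split₀ raw with
      | nil =>
        rw [hA, ih m]
        simp only [pvLoopB, hs]
      | cons t ts =>
        have hkf : pvKeep t = false := by
          rw [hs, List.takeWhile_cons] at hsplit
          by_cases hk : pvKeep t = true
          · rw [if_pos hk] at hsplit; exact absurd hsplit (by simp)
          · simpa using hk
        have hst : PySem.Chars.startswith t ['#'] = true := by
          simpa [pvKeep] using hkf
        rw [hA, ih m]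
        simp only [pvLoopB, hs, hst, if_pos]
    · obtain ⟨y, hy⟩ := pvStrip_of_sdc raw
      have hne : PySem.Chars.split₀ (pvStripDlcComment raw) ≠ [] := by
        rw [hy]
        exact pvSplit_strip_ne y (hy ▸ hline)
      obtain ⟨t, ts, hts⟩ : ∃ t ts, PySem.Chars.split₀ (pvStripDlcComment raw) = t :: ts := by
        cases h : PySem.Chars.split₀ (pvStripDlcComment raw) with
        | nil => exact absurd h hne
        | cons t ts => exact ⟨t, ts, rfl⟩
      have h5 : (PySem.Chars.split₀ raw).takeWhile pvKeep = t :: ts := by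
        rw [← hcore]; exact hts
      obtain ⟨rest2, hs, hkt⟩ : ∃ rest2, PySem.Chars.split₀ raw = t :: rest2 ∧ pvKeep t = true := by
        cases hsr : PySem.Chars.split₀ raw with
        | nil => rw [hsr] at h5; exact absurd h5 (by simp)
        | cons u us =>
          rw [hsr, List.takeWhile_cons] at h5
          by_cases hk : pvKeep u = true
          · rw [if_pos hk] at h5
            exact ⟨us, by rw [(List.cons.injEq ..).mp h5 |>.1], (List.cons.injEq ..).mp h5 |>.1 ▸ hk⟩
          · rw [if_neg hk] at h5; exact absurd h5 (by simp)
      have hnh : PySem.Chars.startswith t ['#'] = false := by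
        simpa [pvKeep] using hkt
      have htok : (PySem.Chars.split₀ (pvStripDlcComment raw)).headD [] = t := by
        rw [hts]; rfl
      have hA : pvLoopA (raw :: rest) m =
          (if pvTokenOk t then pvLoopA rest (m + 1) else false) := by
        simp only [pvLoopA, hline, htok, pvTokenOk]
        simp [Bool.or_assoc]
      have hB : pvLoopB (raw :: rest) m =
          (if pvTokenOk t then pvLoopB rest (m + 1) else false) := by
        simp only [pvLoopB, hs, hnh, Bool.false_eq_true, if_false]
      rw [hA, hB]
      by_cases hok : pvTokenOk t = true
      · rw [if_pos hok, if_pos hok, ih (m + 1)]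
      · rw [if_neg hok, if_neg hok]

-- ===== VERDICT (by name: the statement is the Claim_ definition above) =====
theorem looks_like_dlc_text_spec : Claim_equal_looks_like_dlc_text := by
  intro text _
  unfold Spec_looks_like_dlc_text looks_like_dlc_text looks_like_dlc_text_alt
  exact pvLoops_eq _ 0
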